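-- pv_equiv track=rewrite | github.com/ty-hayes-82/data-analyst-agent | data_analyst_agent/sub_agents/executive_brief_agent/report_utils.py | _build_digest
-- ===== SOURCE A (Python) =====
-- def _extract_executive_summary(markdown: str) -> str:
--     """Pull just the Executive Summary section from a metric report."""
--     lines = markdown.splitlines()
--     in_section = False
--     section_lines: list[str] = []
--     for line in lines:
--         if line.startswith("## Executive Summary"):
--             in_section = True
--             continue
--         if in_section:
--             if line.startswith("## ") and line != "## Executive Summary":
--                 break
--             section_lines.append(line)
--     return "\n".join(section_lines).strip()
--
-- def _extract_insight_cards(markdown: str, max_cards: int = 5) -> str: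
--     """Pull up to ``max_cards`` insight card blocks from a metric report."""
--     lines = markdown.splitlines()
--     in_section = False
--     card_lines: list[str] = []
--     card_count = 0
--     for line in lines:
--         if line.startswith("## Insight Cards"):
--             in_section = True
--             continue
--         if in_section:
--             if line.startswith("## ") and "Insight Cards" not in line:
--                 break
--             if line.startswith("### "):
--                 card_count += 1
--                 if card_count > max_cards:
--                     break
--             card_lines.append(line)
--     return "\n".join(card_lines).strip()
--
-- def _build_digest(reports: dict[str, str]) -> str:
--     """Build a compact digest of metric reports for the LLM prompt."""
--     parts: list[str] = []
--     for metric_name, content in reports.items():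
--         summary = _extract_executive_summary(content)
--         cards = _extract_insight_cards(content, max_cards=4)
--         section = (
--             f"=== {metric_name.upper()} ===\n"
--             f"SUMMARY:\n{summary}\n\n"
--             f"TOP INSIGHTS:\n{cards}\n"
--         )
--         parts.append(section)
--     return "\n\n".join(parts)
-- ===== SOURCE B (Python) =====
-- def _sections(lines):
--     """Split lines into (header, body) pairs at '## ' lines; a leading pseudo-section has header ''."""
--     secs = []
--     cur_header, cur_body = "", []
--     for line in lines:
--         if line.startswith("## "):
--             secs.append((cur_header, cur_body))
--             cur_header, cur_body = line, []
--         else: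
--             cur_body.append(line)
--     secs.append((cur_header, cur_body))
--     return secs
--
--
-- def _summary(secs):
--     out = []
--     started = False
--     for header, body in secs:
--         if header.startswith("## Executive Summary"):
--             started = True
--             out.extend(body)
--         elif started:
--             break
--     return "\n".join(out).strip()
--
--
-- def _cards(secs, max_cards):
--     out = []
--     started = False
--     for header, body in secs:
--         if header.startswith("## Insight Cards"):
--             started = True
--             out.extend(body)
--         elif started:
--             if "Insight Cards" in header:
--                 out.append(header)
--                 out.extend(body)
--             else:
--                 break
--     kept = []
--     count = 0
--     for line in out:
--         if line.startswith("### "):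
--             count += 1
--             if count > max_cards:
--                 break
--         kept.append(line)
--     return "\n".join(kept).strip()
--
--
-- def _build_digest(reports: dict[str, str]) -> str:
--     parts = []
--     for metric_name, content in reports.items():
--         secs = _sections(content.splitlines())
--         parts.append(
--             f"=== {metric_name.upper()} ===\n"
--             f"SUMMARY:\n{_summary(secs)}\n\n"
--             f"TOP INSIGHTS:\n{_cards(secs, 4)}\n"
--         )
--     return "\n\n".join(parts)
-- ===== Notes on version B (the rewrite author's own statement) =====
-- stated objective: alternative
-- what changed: B parses each report once into a list of (header, body-lines) sections and extracts the summary and insight cards by section-level folds plus a separate card-count truncation pass, replacing A's two independent stateful line-by-line scans with their in-section/break/count flags.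
import Mathlib
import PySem

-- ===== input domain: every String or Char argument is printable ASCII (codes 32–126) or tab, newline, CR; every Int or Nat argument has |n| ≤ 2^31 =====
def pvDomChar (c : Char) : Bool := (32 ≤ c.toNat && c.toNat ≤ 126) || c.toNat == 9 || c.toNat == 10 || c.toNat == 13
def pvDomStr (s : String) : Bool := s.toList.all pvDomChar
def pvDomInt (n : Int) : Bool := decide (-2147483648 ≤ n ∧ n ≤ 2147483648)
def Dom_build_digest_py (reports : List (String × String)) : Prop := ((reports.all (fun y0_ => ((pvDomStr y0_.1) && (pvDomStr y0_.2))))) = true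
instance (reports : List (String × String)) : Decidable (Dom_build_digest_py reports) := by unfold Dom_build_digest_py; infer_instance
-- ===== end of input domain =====

-- B restructures the computation (one sectionizing pass per report, then section-level
-- extraction and a separate truncation pass) instead of A's two stateful line scans;
-- same results, similar cost ('alternative').

-- ===== PORT A =====
-- _extract_executive_summary's loop: (lines, in_section, section_lines)
def sumLoopA : List String → Bool → List String → List String
  | [], _, acc => acc
  | l :: rest, ins, acc =>
    if PySem.Str.startswith l "## Executive Summary" then sumLoopA rest true acc
    else if ins then
      if PySem.Str.startswith l "## " && !(l == "## Executive Summary") then acc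
      else sumLoopA rest ins (acc ++ [l])
    else sumLoopA rest ins acc

def extract_executive_summary (markdown : String) : String :=
  PySem.Str.strip (PySem.Str.join "\n" (sumLoopA (PySem.Str.splitlines markdown) false []))

-- _extract_insight_cards's loop: (lines, in_section, card_count, max_cards, card_lines)
def cardLoopA : List String → Bool → Int → Int → List String → List String
  | [], _, _, _, acc => acc
  | l :: rest, ins, cnt, maxc, acc =>
    if PySem.Str.startswith l "## Insight Cards" then cardLoopA rest true cnt maxc acc
    else if ins then
      if PySem.Str.startswith l "## " && !(PySem.Str.isIn "Insight Cards" l) then acc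
      else if PySem.Str.startswith l "### " then
        if cnt + 1 > maxc then acc else cardLoopA rest ins (cnt + 1) maxc (acc ++ [l])
      else cardLoopA rest ins cnt maxc (acc ++ [l])
    else cardLoopA rest ins cnt maxc acc

def extract_insight_cards (markdown : String) (max_cards : Int) : String :=
  PySem.Str.strip (PySem.Str.join "\n" (cardLoopA (PySem.Str.splitlines markdown) false 0 max_cards []))

def build_digest_py (reports : List (String × String)) : String :=
  PySem.Str.join "\n\n"
    ((PySem.Dict.ofList reports).items.foldl
      (fun parts p =>
        parts ++ ["=== " ++ PySem.Str.upper p.1 ++ " ===\nSUMMARY:\n"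
                  ++ extract_executive_summary p.2
                  ++ "\n\nTOP INSIGHTS:\n" ++ extract_insight_cards p.2 4 ++ "\n"]) [])

-- ===== PORT B =====
-- _sections: split lines into (header, body) pairs at '## ' lines (leading pseudo-section has header "")
def secLoopB : List String → String → List String → List (String × List String)
  | [], h, b => [(h, b)]
  | l :: rest, h, b =>
    if PySem.Str.startswith l "## " then (h, b) :: secLoopB rest l []
    else secLoopB rest h (b ++ [l])

def sectionsB (lines : List String) : List (String × List String) := secLoopB lines "" []

-- _summary's loop over sections
def sumLoopB : List (String × List String) → Bool → List String → List String
  | [], _, out => out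
  | (h, b) :: rest, started, out =>
    if PySem.Str.startswith h "## Executive Summary" then sumLoopB rest true (out ++ b)
    else if started then out
    else sumLoopB rest started out

def summaryB (secs : List (String × List String)) : String :=
  PySem.Str.strip (PySem.Str.join "\n" (sumLoopB secs false []))

-- _cards: first loop (collect the whole card region)
def cardColB : List (String × List String) → Bool → List String → List String
  | [], _, out => out
  | (h, b) :: rest, started, out =>
    if PySem.Str.startswith h "## Insight Cards" then cardColB rest true (out ++ b)
    else if started then
      if PySem.Str.isIn "Insight Cards" h then cardColB rest started (out ++ [h] ++ b)
      else out
    else cardColB rest started out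

-- _cards: second loop (keep lines up to max_cards '### ' blocks)
def truncB : List String → Int → Int → List String
  | [], _, _ => []
  | l :: rest, cnt, maxc =>
    if PySem.Str.startswith l "### " then
      if cnt + 1 > maxc then [] else l :: truncB rest (cnt + 1) maxc
    else l :: truncB rest cnt maxc

def cardsB (secs : List (String × List String)) (max_cards : Int) : String :=
  PySem.Str.strip (PySem.Str.join "\n" (truncB (cardColB secs false []) 0 max_cards))

def build_digest_py_alt (reports : List (String × String)) : String :=
  PySem.Str.join "\n\n"
    ((PySem.Dict.ofList reports).items.map (fun p =>
      let secs := sectionsB (PySem.Str.splitlines p.2)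
      "=== " ++ PySem.Str.upper p.1 ++ " ===\nSUMMARY:\n" ++ summaryB secs
        ++ "\n\nTOP INSIGHTS:\n" ++ cardsB secs 4 ++ "\n"))

-- ===== PRECONDITION & SPEC =====
def Spec_build_digest_py (reports : List (String × String)) (out : String) : Prop := out = build_digest_py_alt reports
instance (reports : List (String × String)) (out : String) : Decidable (Spec_build_digest_py reports out) := by unfold Spec_build_digest_py; infer_instance

-- ===== CLAIM (what is proved, stated in full; the proofs are below) =====
def Claim_equal_build_digest_py : Prop := ∀ (reports : List (String × String)), Dom_build_digest_py reports → Spec_build_digest_py reports (build_digest_py reports)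

-- ===== LEMMAS AND PROOFS =====

-- "## Executive Summary"-prefixed lines are "## "-prefixed; similarly for the cards markers
theorem sw_trans_sum (l : String) (hl : PySem.Str.startswith l "## Executive Summary" = true) :
    PySem.Str.startswith l "## " = true := by
  have h1 := (PySem.Chars.startswith_iff _ _).mp (by simpa using hl)
  simpa using (PySem.Chars.startswith_iff l.toList "## ".toList).mpr
    (List.IsPrefix.trans (by decide) h1)

theorem sw_trans_cards (l : String) (hl : PySem.Str.startswith l "## Insight Cards" = true) :
    PySem.Str.startswith l "## " = true := by
  have h1 := (PySem.Chars.startswith_iff _ _).mp (by simpa using hl)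
  simpa using (PySem.Chars.startswith_iff l.toList "## ".toList).mpr
    (List.IsPrefix.trans (by decide) h1)

-- ---- summary ----

theorem sumB_dead (lines : List String) (h : String) (b out : List String)
    (hh : PySem.Str.startswith h "## Executive Summary" = false) :
    sumLoopB (secLoopB lines h b) true out = out := by
  induction lines generalizing b with
  | nil =>
    simp [secLoopB, sumLoopB, hh, -PySem.Str.startswith_eq]
  | cons l t ih =>
    by_cases hl : PySem.Str.startswith l "## " = true
    · simp [secLoopB, hl, sumLoopB, hh, -PySem.Str.startswith_eq]
    · have hl' : PySem.Str.startswith l "## " = false := by simpa using hl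
      simp only [secLoopB, hl', Bool.false_eq_true, if_false]
      exact ih _

theorem sumB_in (lines : List String) (h : String) (b out : List String) (s : Bool)
    (hh : PySem.Str.startswith h "## Executive Summary" = true) :
    sumLoopB (secLoopB lines h b) s out = sumLoopA lines true (out ++ b) := by
  induction lines generalizing h b out s with
  | nil =>
    simp [secLoopB, sumLoopB, sumLoopA, hh, -PySem.Str.startswith_eq]
  | cons l t ih =>
    by_cases hl2 : PySem.Str.startswith l "## " = true
    · by_cases hl : PySem.Str.startswith l "## Executive Summary" = true
      · rw [show secLoopB (l :: t) h b = (h, b) :: secLoopB t l [] by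
          simp [secLoopB, hl2, -PySem.Str.startswith_eq]]
        simp only [sumLoopB, hh, if_true, sumLoopA, hl]
        simpa using ih l [] (out ++ b) true hl
      · have hl' : PySem.Str.startswith l "## Executive Summary" = false := by simpa using hl
        have hne : (l == "## Executive Summary") = false := by
          apply beq_eq_false_iff_ne.mpr
          intro he
          subst he
          exact absurd hl' (by decide)
        rw [show secLoopB (l :: t) h b = (h, b) :: secLoopB t l [] by
          simp [secLoopB, hl2, -PySem.Str.startswith_eq]]
        simp only [sumLoopB, hh, if_true, sumLoopA, hl', Bool.false_eq_true, if_false, hl2,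
          hne, Bool.not_false, Bool.and_true, if_true]
        exact sumB_dead t l [] (out ++ b) hl'
    · have hl2' : PySem.Str.startswith l "## " = false := by simpa using hl2
      have hl' : PySem.Str.startswith l "## Executive Summary" = false := by
        cases hx : PySem.Str.startswith l "## Executive Summary"
        · rfl
        · exact absurd (sw_trans_sum l hx) hl2
      simp only [secLoopB, hl2', Bool.false_eq_true, if_false, sumLoopA, hl',
        Bool.and_eq_true, if_false]
      rw [ih h (b ++ [l]) out s hh]
      simp

theorem sumB_pre (lines : List String) (h : String) (b out : List String)
    (hh : PySem.Str.startswith h "## Executive Summary" = false) :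
    sumLoopB (secLoopB lines h b) false out = sumLoopA lines false out := by
  induction lines generalizing h b with
  | nil =>
    simp [secLoopB, sumLoopB, sumLoopA, hh, -PySem.Str.startswith_eq]
  | cons l t ih =>
    by_cases hl : PySem.Str.startswith l "## Executive Summary" = true
    · have hl2 := sw_trans_sum l hl
      rw [show secLoopB (l :: t) h b = (h, b) :: secLoopB t l [] by
        simp [secLoopB, hl2, -PySem.Str.startswith_eq]]
      simp only [sumLoopB, hh, Bool.false_eq_true, if_false, sumLoopA, hl, if_true]
      simpa using sumB_in t l [] out false hl
    · have hl' : PySem.Str.startswith l "## Executive Summary" = false := by simpa using hl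
      by_cases hl2 : PySem.Str.startswith l "## " = true
      · rw [show secLoopB (l :: t) h b = (h, b) :: secLoopB t l [] by
          simp [secLoopB, hl2, -PySem.Str.startswith_eq]]
        simp only [sumLoopB, hh, Bool.false_eq_true, if_false, sumLoopA, hl']
        exact ih l [] hl'
      · have hl2' : PySem.Str.startswith l "## " = false := by simpa using hl2
        simp only [secLoopB, hl2', Bool.false_eq_true, if_false, sumLoopA, hl']
        exact ih h (b ++ [l]) hh

-- ---- cards ----

-- colA: cardLoopA without the counter (helper for the proofs only)
def colA : List String → Bool → List String → List String
  | [], _, acc => acc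
  | l :: rest, ins, acc =>
    if PySem.Str.startswith l "## Insight Cards" then colA rest true acc
    else if ins then
      if PySem.Str.startswith l "## " && !(PySem.Str.isIn "Insight Cards" l) then acc
      else colA rest ins (acc ++ [l])
    else colA rest ins acc

theorem colA_acc (lines : List String) (ins : Bool) (acc : List String) :
    colA lines ins acc = acc ++ colA lines ins [] := by
  induction lines generalizing ins acc with
  | nil => simp [colA]
  | cons l t ih =>
    simp only [colA]
    split_ifs with h1 h2 h3
    · exact ih true acc
    · simp
    · simp only [List.nil_append]
      rw [ih ins (acc ++ [l]), ih ins [l]]; simp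
    · exact ih ins acc

theorem cardA_eq_trunc_colA (lines : List String) (ins : Bool) (cnt maxc : Int) (acc : List String) :
    cardLoopA lines ins cnt maxc acc = acc ++ truncB (colA lines ins []) cnt maxc := by
  induction lines generalizing ins cnt acc with
  | nil => simp [cardLoopA, colA, truncB]
  | cons l t ih =>
    by_cases h1 : PySem.Str.startswith l "## Insight Cards" = true
    · simp only [cardLoopA, colA, h1, if_true]
      exact ih true cnt acc
    · have h1' : PySem.Str.startswith l "## Insight Cards" = false := by simpa using h1
      simp only [cardLoopA, colA, h1', Bool.false_eq_true, if_false]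
      cases ins with
      | false => simpa using ih false cnt acc
      | true =>
        simp only [if_true]
        by_cases h2 : (PySem.Str.startswith l "## " && !(PySem.Str.isIn "Insight Cards" l)) = true
        · simp [h2, truncB, -PySem.Str.startswith_eq, -PySem.Str.isIn_eq]
        · have h2' : (PySem.Str.startswith l "## " && !(PySem.Str.isIn "Insight Cards" l)) = false := by
            simpa using h2
          simp only [h2', Bool.false_eq_true, if_false, List.nil_append]
          rw [colA_acc t true [l]]
          by_cases h3 : PySem.Str.startswith l "### " = true
          · simp only [h3, if_true, List.singleton_append, truncB]
            by_cases h4 : cnt + 1 > maxc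
            · simp [h4]
            · simp only [h4, if_false]
              rw [ih true (cnt + 1) (acc ++ [l])]
              simp
          · have h3' : PySem.Str.startswith l "### " = false := by simpa using h3
            simp only [h3', Bool.false_eq_true, if_false, List.singleton_append, truncB]
            rw [ih true cnt (acc ++ [l])]
            simp

theorem cardB_dead (lines : List String) (h : String) (b out : List String)
    (hh : PySem.Str.startswith h "## Insight Cards" = false)
    (hin : PySem.Str.isIn "Insight Cards" h = false) :
    cardColB (secLoopB lines h b) true out = out := by
  induction lines generalizing b with
  | nil =>
    simp [secLoopB, cardColB, hh, hin, -PySem.Str.startswith_eq, -PySem.Str.isIn_eq]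
  | cons l t ih =>
    by_cases hl : PySem.Str.startswith l "## " = true
    · simp [secLoopB, hl, cardColB, hh, hin, -PySem.Str.startswith_eq, -PySem.Str.isIn_eq]
    · have hl' : PySem.Str.startswith l "## " = false := by simpa using hl
      simp only [secLoopB, hl', Bool.false_eq_true, if_false]
      exact ih _

theorem cardB_main (lines : List String) (h : String) (b out pend : List String) (s : Bool)
    (hcase : (PySem.Str.startswith h "## Insight Cards" = true ∧ pend = out ++ b) ∨
      (s = true ∧ PySem.Str.startswith h "## Insight Cards" = false ∧
        PySem.Str.isIn "Insight Cards" h = true ∧ pend = out ++ [h] ++ b)) :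
    cardColB (secLoopB lines h b) s out = colA lines true pend := by
  induction lines generalizing h b out pend s with
  | nil =>
    rcases hcase with ⟨hh, hp⟩ | ⟨hs, hh, hin, hp⟩
    · simp [secLoopB, cardColB, hh, colA, hp, -PySem.Str.startswith_eq, -PySem.Str.isIn_eq]
    · subst hs
      simp [secLoopB, cardColB, hh, hin, colA, hp, -PySem.Str.startswith_eq, -PySem.Str.isIn_eq]
  | cons l t ih =>
    by_cases hl : PySem.Str.startswith l "## " = true
    · have step : cardColB (secLoopB (l :: t) h b) s out = cardColB (secLoopB t l []) true pend := by
        rcases hcase with ⟨hh, hp⟩ | ⟨hs, hh, hin, hp⟩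
        · simp [secLoopB, hl, cardColB, hh, hp, -PySem.Str.startswith_eq, -PySem.Str.isIn_eq]
        · subst hs
          simp [secLoopB, hl, cardColB, hh, hin, hp, -PySem.Str.startswith_eq, -PySem.Str.isIn_eq]
      rw [step]
      by_cases hlt : PySem.Str.startswith l "## Insight Cards" = true
      · simp only [colA, hlt, if_true]
        exact ih l [] pend pend true (Or.inl ⟨hlt, by simp⟩)
      · have hlt' : PySem.Str.startswith l "## Insight Cards" = false := by simpa using hlt
        by_cases hli : PySem.Str.isIn "Insight Cards" l = true
        · simp only [colA, hlt', Bool.false_eq_true, if_false, if_true, hl, hli,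
            Bool.not_true, Bool.and_false]
          simpa using ih l [] pend (pend ++ [l]) true (Or.inr ⟨rfl, hlt', hli, by simp⟩)
        · have hli' : PySem.Str.isIn "Insight Cards" l = false := by simpa using hli
          simp only [colA, hlt', Bool.false_eq_true, if_false, if_true, hl, hli',
            Bool.not_false, Bool.and_true]
          exact cardB_dead t l [] pend hlt' hli'
    · have hl' : PySem.Str.startswith l "## " = false := by simpa using hl
      have hlt' : PySem.Str.startswith l "## Insight Cards" = false := by
        cases hx : PySem.Str.startswith l "## Insight Cards"
        · rfl
        · exact absurd (sw_trans_cards l hx) hl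
      have step : cardColB (secLoopB (l :: t) h b) s out =
          cardColB (secLoopB t h (b ++ [l])) s out := by
        simp [secLoopB, hl', -PySem.Str.startswith_eq]
      rw [step]
      simp only [colA, hlt', Bool.false_eq_true, if_false, if_true, hl',
        Bool.false_and]
      rcases hcase with ⟨hh, hp⟩ | ⟨hs, hh, hin, hp⟩
      · exact ih h (b ++ [l]) out (pend ++ [l]) s (Or.inl ⟨hh, by simp [hp]⟩)
      · exact ih h (b ++ [l]) out (pend ++ [l]) s (Or.inr ⟨hs, hh, hin, by simp [hp]⟩)

theorem cardB_pre (lines : List String) (h : String) (b out : List String)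
    (hh : PySem.Str.startswith h "## Insight Cards" = false) :
    cardColB (secLoopB lines h b) false out = colA lines false out := by
  induction lines generalizing h b with
  | nil =>
    simp [secLoopB, cardColB, hh, colA, -PySem.Str.startswith_eq, -PySem.Str.isIn_eq]
  | cons l t ih =>
    by_cases hlt : PySem.Str.startswith l "## Insight Cards" = true
    · have hl2 := sw_trans_cards l hlt
      rw [show secLoopB (l :: t) h b = (h, b) :: secLoopB t l [] by
        simp [secLoopB, hl2, -PySem.Str.startswith_eq]]
      simp only [cardColB, hh, Bool.false_eq_true, if_false, colA, hlt, if_true]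
      exact cardB_main t l [] out out false (Or.inl ⟨hlt, by simp⟩)
    · have hlt' : PySem.Str.startswith l "## Insight Cards" = false := by simpa using hlt
      by_cases hl2 : PySem.Str.startswith l "## " = true
      · rw [show secLoopB (l :: t) h b = (h, b) :: secLoopB t l [] by
          simp [secLoopB, hl2, -PySem.Str.startswith_eq]]
        simp only [cardColB, hh, Bool.false_eq_true, if_false, colA, hlt']
        exact ih l [] hlt'
      · have hl2' : PySem.Str.startswith l "## " = false := by simpa using hl2
        simp only [secLoopB, hl2', Bool.false_eq_true, if_false, colA, hlt']
        exact ih h (b ++ [l]) hh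

-- ---- per-report and top level ----

theorem summary_eq (content : String) :
    extract_executive_summary content = summaryB (sectionsB (PySem.Str.splitlines content)) := by
  unfold extract_executive_summary summaryB sectionsB
  rw [sumB_pre _ "" [] [] (by decide)]

theorem cards_eq (content : String) :
    extract_insight_cards content 4 = cardsB (sectionsB (PySem.Str.splitlines content)) 4 := by
  unfold extract_insight_cards cardsB sectionsB
  have hA := cardA_eq_trunc_colA (PySem.Str.splitlines content) false 0 4 []
  simp only [List.nil_append] at hA
  rw [cardB_pre _ "" [] [] (by decide), hA]

-- ===== VERDICT (by name: the statement is the Claim_ definition above) =====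
theorem build_digest_py_spec : Claim_equal_build_digest_py := by
  intro reports _
  unfold Spec_build_digest_py build_digest_py build_digest_py_alt
  rw [PySem.List.foldl_append_singleton_eq_map, List.nil_append]
  apply congrArg
  apply List.map_congr_left
  intro p _
  dsimp only
  rw [summary_eq, cards_eq]
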